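-- pv_equiv track=rewrite | github.com/tejas161/HealthPilot | agent/drug_safety_checker.py | _normalize_to_ingredients
-- ===== SOURCE A (Python) =====
-- def _normalize_to_ingredients(medicine_names: list[str], brand_map: dict[str, str]) -> list[str]:
--     """Resolve each name to canonical ingredient; unknown names kept as-is for display."""
--     ingredients: list[str] = []
--     seen: set[str] = set()
--     for name in medicine_names:
--         key = name.lower()
--         ingredient = brand_map.get(key)
--         if ingredient and ingredient not in seen:
--             ingredients.append(ingredient)
--             seen.add(ingredient)
--         elif not ingredient and name not in seen:
--             ingredients.append(name)
--             seen.add(name)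
--     return ingredients
-- ===== SOURCE B (Python) =====
-- def _normalize_to_ingredients(medicine_names: list[str], brand_map: dict[str, str]) -> list[str]:
--     """Resolve each name to canonical ingredient; unknown names kept as-is for display.
--
--     Records the first position at which each resolved token occurs, then recovers
--     first-occurrence order by sorting the tokens on their recorded position
--     (order by sort key instead of order maintained while appending)."""
--     first: dict[str, int] = {}
--     for i, name in enumerate(medicine_names):
--         first.setdefault(brand_map.get(name.lower()) or name, i)
--     return sorted(first, key=first.get)
-- ===== Notes on version B (the rewrite author's own statement) =====
-- stated objective: alternative
-- what changed: Instead of A's forward loop that maintains output order with an append-and-seen-set, B records each resolved token's first position in a dict via setdefault and recovers first-occurrence order by sorting the tokens on that recorded position.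
import Mathlib
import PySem

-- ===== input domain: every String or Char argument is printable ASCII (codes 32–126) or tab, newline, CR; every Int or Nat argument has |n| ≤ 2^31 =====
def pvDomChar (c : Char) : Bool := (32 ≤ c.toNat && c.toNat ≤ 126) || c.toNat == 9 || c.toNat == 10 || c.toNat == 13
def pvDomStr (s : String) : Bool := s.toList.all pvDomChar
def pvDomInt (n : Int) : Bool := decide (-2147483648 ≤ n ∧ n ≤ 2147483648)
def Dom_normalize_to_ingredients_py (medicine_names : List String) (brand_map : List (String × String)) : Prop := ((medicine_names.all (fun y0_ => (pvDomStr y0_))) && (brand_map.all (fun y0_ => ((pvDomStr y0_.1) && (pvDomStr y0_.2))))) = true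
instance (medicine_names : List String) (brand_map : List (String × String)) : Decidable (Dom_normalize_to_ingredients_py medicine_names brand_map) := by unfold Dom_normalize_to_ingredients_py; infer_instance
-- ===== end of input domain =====

-- B records the first position of each resolved token in a dict and recovers
-- first-occurrence order by sorting the tokens on that position (order by sort key
-- instead of A's order-maintaining append with a seen set); objective: alternative.

-- ===== PORT A =====
-- loop body of A's for-loop, as a named step function over the state (ingredients, seen)
def pvStepA (brand_map : List (String × String))
    (st : List String × PySem.Set String) (name : String) :
    List String × PySem.Set String :=
  let key := PySem.Str.lower name
  match PySem.Dict.get? (PySem.Dict.mk brand_map) key with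
  | some ingredient =>
    if ingredient ≠ "" then
      if PySem.Set.contains st.2 ingredient = false then
        (st.1 ++ [ingredient], PySem.Set.add st.2 ingredient)
      else st
    else
      if PySem.Set.contains st.2 name = false then
        (st.1 ++ [name], PySem.Set.add st.2 name)
      else st
  | none =>
    if PySem.Set.contains st.2 name = false then
      (st.1 ++ [name], PySem.Set.add st.2 name)
    else st

def normalize_to_ingredients_py (medicine_names : List String) (brand_map : List (String × String)) : List String :=
  (medicine_names.foldl (pvStepA brand_map) ([], PySem.Set.empty)).1

-- ===== PORT B =====
-- brand_map.get(name.lower()) or name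
def pvResolve (brand_map : List (String × String)) (name : String) : String :=
  match PySem.Dict.get? (PySem.Dict.mk brand_map) (PySem.Str.lower name) with
  | some r => if r ≠ "" then r else name
  | none => name

-- loop body of B: first.setdefault(brand_map.get(name.lower()) or name, i)
def pvStepB (brand_map : List (String × String)) (d : PySem.Dict String Int) (p : Int × String) : PySem.Dict String Int :=
  PySem.Dict.setdefault d (pvResolve brand_map p.2) p.1

-- sorted(first, key=first.get): every key is present in 'first', so first.get(k) is its
-- stored Int and 'getD … 0' is exact here
def normalize_to_ingredients_py_alt (medicine_names : List String) (brand_map : List (String × String)) : List String :=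
  let first := (PySem.List.enumerate medicine_names).foldl (pvStepB brand_map) PySem.Dict.empty
  PySem.List.sorted first.keys (fun k => PySem.Dict.getD first k 0)

-- ===== PRECONDITION & SPEC =====
def Spec_normalize_to_ingredients_py (medicine_names : List String) (brand_map : List (String × String)) (out : List String) : Prop := out = normalize_to_ingredients_py_alt medicine_names brand_map
instance (medicine_names : List String) (brand_map : List (String × String)) (out : List String) : Decidable (Spec_normalize_to_ingredients_py medicine_names brand_map out) := by unfold Spec_normalize_to_ingredients_py; infer_instance

-- ===== CLAIM (what is proved, stated in full; the proofs are below) =====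
def Claim_equal_normalize_to_ingredients_py : Prop := ∀ (medicine_names : List String) (brand_map : List (String × String)), Dom_normalize_to_ingredients_py medicine_names brand_map → Spec_normalize_to_ingredients_py medicine_names brand_map (normalize_to_ingredients_py medicine_names brand_map)

-- ===== LEMMAS AND PROOFS =====

-- first-occurrence dedup by recursion-with-filter (the shape of B's fold)
def pvDedupF : List String → List String
  | [] => []
  | a :: t => a :: (pvDedupF t).filter (fun x => x ≠ a)

-- one step of A's loop, run on a state whose two components coincide, appends exactly
-- the resolved token via Set.add to both components
lemma pvStepA_diag (bm : List (String × String)) (s : PySem.Set String) (name : String) :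
    pvStepA bm (s, s) name =
      (PySem.Set.add s (pvResolve bm name), PySem.Set.add s (pvResolve bm name)) := by
  unfold pvStepA pvResolve
  cases h : PySem.Dict.get? (PySem.Dict.mk bm) (PySem.Str.lower name) with
  | none => simp [PySem.Set.add]; split_ifs <;> simp_all
  | some r =>
    by_cases hr : r = "" <;> simp [hr, PySem.Set.add] <;> split_ifs <;> simp_all

lemma pvLoop_diag (bm : List (String × String)) :
    ∀ (ms : List String) (s : PySem.Set String),
      ms.foldl (pvStepA bm) (s, s) =
        (ms.foldl (fun acc n => PySem.Set.add acc (pvResolve bm n)) s,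
         ms.foldl (fun acc n => PySem.Set.add acc (pvResolve bm n)) s) := by
  intro ms
  induction ms with
  | nil => intro s; rfl
  | cons n t ih => intro s; simp [List.foldl_cons, pvStepA_diag, ih]

-- dedup-by-filter commutes with filter
lemma pvDedupF_filter (p : String → Bool) :
    ∀ l : List String, pvDedupF (l.filter p) = (pvDedupF l).filter p := by
  intro l
  induction l with
  | nil => rfl
  | cons a t ih =>
    by_cases hp : p a = true
    · simp only [List.filter_cons, hp, if_pos, pvDedupF, ih, List.filter_filter]
      exact congrArg _ (List.filter_congr
        (fun x _ => by by_cases hx : x = a <;> simp [hx, Bool.and_comm]))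
    · simp only [pvDedupF, List.filter_cons, if_neg (by simp [hp] : ¬ p a = true),
        ih, List.filter_filter]
      refine (List.filter_congr (fun x _ => ?_)).symm
      by_cases hxa : x = a
      · subst hxa; simp [hp]
      · simp [hxa]

-- A's set-building fold, started from any set s, appends the filtered dedup of the rest
lemma pvFoldlAdd_eq (l : List String) :
    ∀ s : List String,
      l.foldl (fun acc x => PySem.Set.add acc x) s
        = s ++ pvDedupF (l.filter (fun x => !(s.contains x))) := by
  induction l with
  | nil => intro s; simp [pvDedupF]
  | cons a t ih =>
    intro s
    by_cases ha : a ∈ s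
    · simp only [List.foldl_cons]
      rw [show PySem.Set.add s a = s from by simp [PySem.Set.add, ha], ih,
        List.filter_cons, if_neg (by simp [ha])]
    · simp only [List.foldl_cons]
      rw [show PySem.Set.add s a = s ++ [a] from by simp [PySem.Set.add, ha], ih,
        List.filter_cons, if_pos (by simp [ha]), pvDedupF,
        show (fun x => !((s ++ [a]).contains x))
            = (fun x => decide (x ≠ a) && !(s.contains x)) from
          funext (fun x => by by_cases hx : x = a <;> simp [hx]),
        ← List.filter_filter, pvDedupF_filter, List.append_assoc]
      rfl

-- first-occurrence dedup is duplicate-free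
lemma pvDedupF_nodup : ∀ l : List String, (pvDedupF l).Nodup := by
  intro l
  induction l with
  | nil => exact List.nodup_nil
  | cons a t ih =>
    refine List.Nodup.cons (fun h => ?_) (ih.filter _)
    simp [List.mem_filter] at h

-- keys of B's setdefault fold grow exactly like A's seen-set fold
lemma pvKeysFoldB (bm : List (String × String)) :
    ∀ (ps : List (Int × String)) (d : PySem.Dict String Int),
      (ps.foldl (pvStepB bm) d).keys
        = (ps.map (fun p => pvResolve bm p.2)).foldl (fun s x => PySem.Set.add s x) d.keys := by
  intro ps
  induction ps with
  | nil => intro d; rfl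
  | cons p t ih =>
    intro d
    simp only [List.foldl_cons, List.map_cons, ih]
    congr 1
    rw [pvStepB, PySem.Dict.keys_setdefault, PySem.Dict.contains_eq_decide_mem_keys]
    by_cases h : pvResolve bm p.2 ∈ d.keys
    · rw [if_pos (by simp [h])]; simp [PySem.Set.add, h]
    · rw [if_neg (by simp [h])]; simp [PySem.Set.add, h]

-- the recorded positions stay strictly increasing along the dict
lemma pvValuesFoldB (bm : List (String × String)) :
    ∀ (ps : List (Int × String)) (d : PySem.Dict String Int),
      (ps.map Prod.fst).Pairwise (· < ·) →
      (∀ v ∈ d.values, ∀ q ∈ ps, v < q.1) →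
      d.values.Pairwise (· < ·) →
      (ps.foldl (pvStepB bm) d).values.Pairwise (· < ·) := by
  intro ps
  induction ps with
  | nil => intro d _ _ hd; simpa using hd
  | cons p t ih =>
    intro d hps hlt hd
    simp only [List.map_cons, List.pairwise_cons] at hps
    simp only [List.foldl_cons]
    by_cases hc : PySem.Dict.contains d (pvResolve bm p.2) = true
    · rw [pvStepB, PySem.Dict.setdefault_of_contains _ _ hc]
      exact ih d hps.2 (fun v hv q hq => hlt v hv q (List.mem_cons_of_mem _ hq)) hd
    · rw [pvStepB, PySem.Dict.setdefault_of_not_contains _ _ (by simpa using hc)]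
      have hv : (PySem.Dict.insert d (pvResolve bm p.2) p.1).values = d.values ++ [p.1] := by
        simp only [PySem.Dict.values,
          PySem.Dict.items_insert_of_not_contains _ _ (by simpa using hc), List.map_append]
        rfl
      refine ih _ hps.2 ?_ ?_
      · intro v hv' q hq
        rw [hv] at hv'
        rcases List.mem_append.mp hv' with h | h
        · exact hlt v h q (List.mem_cons_of_mem _ hq)
        · rw [List.mem_singleton.mp h]
          exact hps.1 q.1 (List.mem_map.mpr ⟨q, hq, rfl⟩)
      · rw [hv]
        refine List.pairwise_append.mpr ⟨hd, List.pairwise_singleton _ _, ?_⟩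
        intro v hv' w hw
        rw [List.mem_singleton.mp hw]
        exact hlt v hv' p List.mem_cons_self

-- B's dict, built over the whole list, has keys = dedup-by-filter of the resolved tokens
lemma pvKeysB (ms : List String) (bm : List (String × String)) :
    ((PySem.List.enumerate ms).foldl (pvStepB bm) PySem.Dict.empty).keys
      = pvDedupF (ms.map (pvResolve bm)) := by
  rw [pvKeysFoldB, PySem.Dict.keys_empty,
    show (PySem.List.enumerate ms).map (fun p => pvResolve bm p.2)
        = ms.map (pvResolve bm) from by
      rw [show (fun p : Int × String => pvResolve bm p.2)
            = (pvResolve bm) ∘ (fun p : Int × String => p.2) from rfl,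
        ← List.map_map, PySem.List.map_snd_enumerate],
    pvFoldlAdd_eq]
  simp

-- B's program is dedup-by-filter of the resolved tokens: the keys are already in
-- strictly increasing first-position order, so the stable sort returns them unchanged
lemma pvAlt_eq_dedupF (ms : List String) (bm : List (String × String)) :
    normalize_to_ingredients_py_alt ms bm = pvDedupF (ms.map (pvResolve bm)) := by
  unfold normalize_to_ingredients_py_alt
  have hkeys := pvKeysB ms bm
  have hnd : ((PySem.List.enumerate ms).foldl (pvStepB bm) PySem.Dict.empty).keys.Nodup := by
    rw [hkeys]; exact pvDedupF_nodup _
  have hvals : ((PySem.List.enumerate ms).foldl (pvStepB bm) PySem.Dict.empty).values.Pairwise (· < ·) := by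
    refine pvValuesFoldB bm _ _ ?_ (by simp [PySem.Dict.values, PySem.Dict.empty]) ?_
    · exact List.pairwise_map.mpr (PySem.List.pairwise_lt_enumerate ms 0)
    · simp [PySem.Dict.values, PySem.Dict.empty]
  rw [PySem.List.sorted_eq_of_perm_of_pairwise_lt _ _ _ (List.Perm.refl _) ?_, hkeys]
  · rw [PySem.Dict.values_eq_map_keys _ hnd 0] at hvals
    exact List.pairwise_map.mp hvals

-- ===== VERDICT (by name: the statement is the Claim_ definition above) =====
theorem normalize_to_ingredients_py_spec : Claim_equal_normalize_to_ingredients_py := by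
  intro ms bm _
  unfold Spec_normalize_to_ingredients_py normalize_to_ingredients_py
  rw [show (([], PySem.Set.empty) : List String × PySem.Set String)
        = (([] : List String), ([] : List String)) from rfl, pvLoop_diag]
  show List.foldl (fun acc n => PySem.Set.add acc (pvResolve bm n)) [] ms = _
  rw [show List.foldl (fun acc n => PySem.Set.add acc (pvResolve bm n)) [] ms
        = List.foldl (fun acc x => PySem.Set.add acc x) []
            (ms.map (pvResolve bm)) from List.foldl_map.symm,
    pvFoldlAdd_eq, pvAlt_eq_dedupF]
  simp
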